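-- pv_equiv track=rewrite | github.com/nullhack/flowr | scripts/check_knowledge.py | _count_concept_paragraphs
-- ===== SOURCE A (Python) =====
-- def _count_concept_paragraphs(text: str) -> int:
--     """Count concept paragraphs in Concepts section.
--
--     Each concept paragraph starts with a bold heading
--     (**...**: or **...**). Blank lines separate paragraphs.
--     """
--     count = 0
--     in_paragraph = False
--     for line in text.splitlines():
--         stripped = line.strip()
--         if not stripped:
--             in_paragraph = False
--             continue
--         if stripped.startswith("**") and not in_paragraph:
--             count += 1
--             in_paragraph = True
--         elif not in_paragraph and stripped:
--             in_paragraph = True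
--             count += 1
--     return count
-- ===== SOURCE B (Python) =====
-- from itertools import groupby
--
--
-- def _count_concept_paragraphs(text: str) -> int:
--     """Count maximal runs of consecutive non-blank lines (run-length grouping)."""
--     return sum(
--         1
--         for key, _ in groupby(text.splitlines(), key=lambda line: bool(line.strip()))
--         if key
--     )
-- ===== Notes on version B (the rewrite author's own statement) =====
-- stated objective: idiomatic
-- what changed: Replaced the explicit in_paragraph state machine (whose '**' branch is redundant: both branches do the same) by itertools.groupby run-length grouping on line blankness, counting the non-blank groups.
import Mathlib
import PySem

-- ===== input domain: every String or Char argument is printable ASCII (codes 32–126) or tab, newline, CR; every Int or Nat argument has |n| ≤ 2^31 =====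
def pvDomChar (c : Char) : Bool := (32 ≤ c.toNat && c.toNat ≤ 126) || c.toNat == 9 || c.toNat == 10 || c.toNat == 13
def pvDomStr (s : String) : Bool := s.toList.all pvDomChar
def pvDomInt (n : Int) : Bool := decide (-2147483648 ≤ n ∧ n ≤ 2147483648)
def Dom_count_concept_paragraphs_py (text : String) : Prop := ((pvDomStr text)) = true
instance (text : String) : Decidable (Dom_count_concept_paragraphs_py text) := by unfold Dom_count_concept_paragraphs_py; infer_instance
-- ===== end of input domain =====

-- B replaces A's explicit in_paragraph state machine by run-length grouping on line blankness (idiomatic groupby).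


-- ===== PORT A =====
-- loop body of A, transliterated branch for branch; state = (count, in_paragraph)
def pvStepA (st : Int × Bool) (line : String) : Int × Bool :=
  let stripped := PySem.Str.strip line
  if stripped == "" then (st.1, false)
  else if PySem.Str.startswith stripped "**" && !st.2 then (st.1 + 1, true)
  else if !st.2 then (st.1 + 1, true)
  else st

def count_concept_paragraphs_py (text : String) : Int :=
  ((PySem.Str.splitlines text).foldl pvStepA (0, false)).1

-- ===== PORT B =====
-- groupby(text.splitlines(), key = line -> bool(line.strip())); count groups with key True.
-- prev is the previous line's key (none at the start); a counted group starts at a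
-- non-blank line whose key differs from prev.
def pvGroupCount : Option Bool → List String → Int
  | _, [] => 0
  | prev, l :: ls =>
      let k := !(PySem.Str.strip l == "")
      (if k && prev != some k then 1 else 0) + pvGroupCount (some k) ls

def count_concept_paragraphs_py_alt (text : String) : Int :=
  pvGroupCount none (PySem.Str.splitlines text)

-- ===== PRECONDITION & SPEC =====
def Spec_count_concept_paragraphs_py (text : String) (out : Int) : Prop := out = count_concept_paragraphs_py_alt text
instance (text : String) (out : Int) : Decidable (Spec_count_concept_paragraphs_py text out) := by unfold Spec_count_concept_paragraphs_py; infer_instance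

-- ===== CLAIM (what is proved, stated in full; the proofs are below) =====
def Claim_equal_count_concept_paragraphs_py : Prop := ∀ (text : String), Dom_count_concept_paragraphs_py text → Spec_count_concept_paragraphs_py text (count_concept_paragraphs_py text)

-- ===== LEMMAS AND PROOFS =====

-- for a blank-key continuation, 'none' and 'some false' as previous key give the same count
theorem pvGroupCount_none_eq_some_false (ls : List String) :
    pvGroupCount none ls = pvGroupCount (some false) ls := by
  cases ls with
  | nil => rfl
  | cons l ls =>
      simp only [pvGroupCount]
      cases h : (PySem.Str.strip l == "") <;> simp

-- loop invariant: A's fold from (c, inp) equals c + B's group count with matching prev key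
theorem foldA_eq (ls : List String) (c : Int) (inp : Bool) :
    (ls.foldl pvStepA (c, inp)).1
    = c + pvGroupCount (if inp then some true else none) ls := by
  induction ls generalizing c inp with
  | nil => simp [pvGroupCount]
  | cons l ls ih =>
      rw [List.foldl_cons]
      cases hb : (PySem.Str.strip l == "") with
      | true =>
          have hstep : pvStepA (c, inp) l = (c, false) := by
            simp [pvStepA, hb]
          rw [hstep, ih c false]
          cases inp <;> simp [pvGroupCount, hb, pvGroupCount_none_eq_some_false]
      | false =>
          cases inp with
          | true =>
              have hstep : pvStepA (c, true) l = (c, true) := by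
                simp [pvStepA, hb]
              rw [hstep, ih c true]
              simp [pvGroupCount, hb]
          | false =>
              have hstep : pvStepA (c, false) l = (c + 1, true) := by
                cases hs : PySem.Str.startswith (PySem.Str.strip l) "**" <;>
                  simp [pvStepA, hb]
              rw [hstep, ih (c + 1) true]
              simp [pvGroupCount, hb]
              ring

-- ===== VERDICT (by name: the statement is the Claim_ definition above) =====
theorem count_concept_paragraphs_py_spec : Claim_equal_count_concept_paragraphs_py := by
  intro text _
  unfold Spec_count_concept_paragraphs_py count_concept_paragraphs_py count_concept_paragraphs_py_alt
  rw [foldA_eq]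
  simp
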